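-- pv_equiv track=rewrite | github.com/vike41/VFX | PipelineScripts/define_texture_for_arnold/define_texture_for_arnold.py | defineExictingMaps
-- ===== SOURCE A (Python) =====
-- def defineExictingMaps(list, maps):
--     print ("LIST: ", list)
--     print ("MAPS: ", maps)
--     count = 0
--     foundedMapsList = []
--
--     for index in list:
--         for item in maps:
--             if item in index:
--                 foundedMapsList.append(item)
--                 count = count +1
--             else:
--                 pass
--                 #print ("Dont")
--     print ("foundedMapList", foundedMapsList)
--     #TODO Remove duplicated elements
--     exportetTypeMaps = set(foundedMapsList)
--
--     print ("exportetTypeMaps", exportetTypeMaps)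
--     return exportetTypeMaps
-- ===== SOURCE B (Python) =====
-- def defineExictingMaps(list, maps):
--     # Worklist scan: keep the not-yet-found (deduplicated) maps, drop each map
--     # from the worklist at its first match, stop early once all maps are found.
--     remaining = [*dict.fromkeys(maps)]
--     found = []
--     for text in list:
--         if not remaining:
--             break
--         still = []
--         for m in remaining:
--             if m in text:
--                 found.append(m)
--             else:
--                 still.append(m)
--         remaining = still
--     return set(found)
-- ===== Notes on version B (the rewrite author's own statement) =====
-- stated objective: faster
-- what changed: A tests every map against every text, collecting duplicate hits into a list that set() dedups at the end; B keeps a shrinking worklist of not-yet-found maps, removes each map at its first match and stops scanning texts early once every map is found, never building the duplicated list.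
import Mathlib
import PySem

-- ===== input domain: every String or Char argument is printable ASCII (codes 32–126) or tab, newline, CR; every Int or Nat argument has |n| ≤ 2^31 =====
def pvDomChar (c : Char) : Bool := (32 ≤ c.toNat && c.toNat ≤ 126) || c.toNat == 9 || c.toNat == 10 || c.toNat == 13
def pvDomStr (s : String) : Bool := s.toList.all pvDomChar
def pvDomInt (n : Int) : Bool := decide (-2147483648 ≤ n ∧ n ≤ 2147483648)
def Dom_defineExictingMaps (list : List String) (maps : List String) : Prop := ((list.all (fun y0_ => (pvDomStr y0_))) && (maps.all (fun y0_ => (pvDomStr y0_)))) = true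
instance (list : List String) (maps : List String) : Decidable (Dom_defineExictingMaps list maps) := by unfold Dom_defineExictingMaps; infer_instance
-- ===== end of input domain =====

-- B replaces A's collect-duplicates-then-set() nested scan by a shrinking worklist of
-- not-yet-found maps with early exit once all are found (measured faster in a timing run).


-- ===== PORT A =====
-- literal port of A: count and foundedMapsList accumulated over the nested loops,
-- then set(foundedMapsList) (prints dropped; they do not affect the result)
def defineExictingMaps (list : List String) (maps : List String) : List String :=
  let st :=
    list.foldl (fun (st : Int × List String) index =>
      maps.foldl (fun (st : Int × List String) item =>
        if PySem.Str.isIn item index then (st.1 + 1, st.2 ++ [item]) else st) st)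
      (0, [])
  PySem.Set.ofList st.2

-- ===== PORT B =====
-- worklist loop of Source B: per text, split remaining into found-now and still-missing
def pvAltLoop : List String → List String → List String → List String
  | _, [], found => found
  | [], _, found => found
  | t :: ts, m0 :: rem, found =>
      let step :=
        (m0 :: rem).foldl (fun (p : List String × List String) m =>
          if PySem.Str.isIn m t then (p.1 ++ [m], p.2) else (p.1, p.2 ++ [m])) (found, [])
      pvAltLoop ts step.2 step.1

def defineExictingMaps_alt (list : List String) (maps : List String) : List String :=
  pvAltLoop list (PySem.List.dedup maps) []

-- ===== PRECONDITION & SPEC =====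
def Spec_defineExictingMaps (list : List String) (maps : List String) (out : List String) : Prop := out = defineExictingMaps_alt list maps
instance (list : List String) (maps : List String) (out : List String) : Decidable (Spec_defineExictingMaps list maps out) := by unfold Spec_defineExictingMaps; infer_instance

-- ===== CLAIM (what is proved, stated in full; the proofs are below) =====
def Claim_equal_defineExictingMaps : Prop := ∀ (list : List String) (maps : List String), Dom_defineExictingMaps list maps → Spec_defineExictingMaps list maps (defineExictingMaps list maps)

-- ===== LEMMAS AND PROOFS =====

theorem innerA_snd (maps : List String) (t : String) (st : Int × List String) :
    (maps.foldl (fun (st : Int × List String) item =>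
        if PySem.Str.isIn item t then (st.1 + 1, st.2 ++ [item]) else st) st).2
      = st.2 ++ maps.filter (fun m => PySem.Str.isIn m t) := by
  induction maps generalizing st with
  | nil => simp
  | cons m ms ih =>
      simp only [List.foldl_cons, List.filter_cons]
      by_cases h : PySem.Str.isIn m t = true
      · rw [if_pos h, if_pos h, ih]; simp
      · rw [if_neg h, if_neg h, ih]

theorem outerA_snd (maps : List String) (list : List String) (st : Int × List String) :
    (list.foldl (fun (st : Int × List String) index =>
        maps.foldl (fun (st : Int × List String) item =>
          if PySem.Str.isIn item index then (st.1 + 1, st.2 ++ [item]) else st) st) st).2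
      = list.foldl (fun acc t => acc ++ maps.filter (fun m => PySem.Str.isIn m t)) st.2 := by
  induction list generalizing st with
  | nil => rfl
  | cons t ts ih =>
      simp only [List.foldl_cons, ih, innerA_snd]

theorem ofList_foldl_append (g : String → List String) (l : List String) (acc : List String) :
    PySem.Set.ofList (l.foldl (fun acc t => acc ++ g t) acc)
      = l.foldl (fun s t => PySem.Set.update s (g t)) (PySem.Set.ofList acc) := by
  induction l generalizing acc with
  | nil => rfl
  | cons t ts ih =>
      simp only [List.foldl_cons, ih, PySem.Set.ofList_append]

theorem ofList_filter (p : String → Bool) (xs : List String) :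
    PySem.Set.ofList (xs.filter p) = (PySem.Set.ofList xs).filter p := by
  induction xs using List.reverseRecOn with
  | nil => rfl
  | append_singleton xs x ih =>
      rw [List.filter_append, PySem.Set.ofList_append_singleton, PySem.Set.add_eq_ite]
      by_cases hp : p x
      · simp only [List.filter_cons, List.filter_nil, hp, if_pos]
        rw [PySem.Set.ofList_append_singleton, PySem.Set.add_eq_ite]
        by_cases hx : x ∈ PySem.Set.ofList xs
        · rw [if_pos hx, if_pos, ih]
          rw [ih]; exact List.mem_filter.mpr ⟨hx, hp⟩
        · rw [if_neg hx, if_neg, List.filter_append, ih]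
          · simp [hp]
          · rw [ih]; intro hc; exact hx (List.mem_filter.mp hc).1
      · simp only [List.filter_cons, List.filter_nil, hp, if_neg, Bool.false_eq_true,
          not_false_iff, List.append_nil]
        by_cases hx : x ∈ PySem.Set.ofList xs
        · rw [if_pos hx, ih]
        · rw [if_neg hx, List.filter_append, ih]
          simp [hp]

theorem stepB (t : String) (rem : List String) (found acc2 : List String) :
    rem.foldl (fun (p : List String × List String) m =>
        if PySem.Str.isIn m t then (p.1 ++ [m], p.2) else (p.1, p.2 ++ [m])) (found, acc2)
      = (found ++ rem.filter (fun m => PySem.Str.isIn m t),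
         acc2 ++ rem.filter (fun m => !PySem.Str.isIn m t)) := by
  induction rem generalizing found acc2 with
  | nil => simp
  | cons m ms ih =>
      simp only [List.foldl_cons, List.filter_cons]
      by_cases h : PySem.Str.isIn m t = true
      · have h' : PySem.Chars.isIn m.toList t.toList = true := by simpa using h
        have h2 : ¬((!PySem.Str.isIn m t) = true) := by simp [h']
        rw [if_pos h, if_pos h, if_neg h2, ih]; simp
      · have h' : PySem.Chars.isIn m.toList t.toList = false := by simpa using h
        have h2 : (!PySem.Str.isIn m t) = true := by simp [h']
        rw [if_neg h, if_neg h, if_pos h2, ih]; simp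

theorem altLoop_nil (rem found : List String) : pvAltLoop [] rem found = found := by
  cases rem <;> rfl

theorem update_of_subset (s xs : List String) (h : ∀ y ∈ xs, y ∈ s) :
    PySem.Set.update s xs = s := by
  rw [PySem.Set.update_eq_append_filter]
  have : (PySem.Set.ofList xs).filter (fun y => !(PySem.Set.contains s y)) = [] := by
    rw [List.filter_eq_nil_iff]
    intro y hy
    have hy' : y ∈ s := h y ((PySem.Set.mem_ofList _ _).mp hy)
    simpa using hy'
  rw [this, List.append_nil]

theorem foldl_update_of_full (maps : List String) (texts : List String) (s : List String)
    (h : ∀ m ∈ maps, m ∈ s) :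
    texts.foldl (fun s t => PySem.Set.update s (maps.filter (fun m => PySem.Str.isIn m t))) s
      = s := by
  induction texts with
  | nil => rfl
  | cons t ts ih =>
      simp only [List.foldl_cons]
      rw [update_of_subset s _ (fun y hy => h y (List.mem_of_mem_filter hy)), ih]

theorem main_invariant (maps : List String) (texts : List String) (s : List String)
    (hs : s.Nodup) :
    pvAltLoop texts ((PySem.Set.ofList maps).filter (fun m => !(PySem.Set.contains s m))) s
      = texts.foldl (fun s t => PySem.Set.update s (maps.filter (fun m => PySem.Str.isIn m t))) s := by
  induction texts generalizing s with
  | nil => rw [altLoop_nil]; rfl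
  | cons t ts ih =>
      rcases hrem : (PySem.Set.ofList maps).filter (fun m => !(PySem.Set.contains s m)) with _ | ⟨m0, rest⟩
      · -- worklist empty: every map is already in s, both sides return s
        rw [pvAltLoop]
        rw [foldl_update_of_full maps (t :: ts) s]
        intro m hm
        have hm' : m ∈ PySem.Set.ofList maps := (PySem.Set.mem_ofList _ _).mpr hm
        by_contra hns
        have hmem0 : m ∈ ([] : List String) := by
          rw [← hrem]
          refine List.mem_filter.mpr ⟨hm', ?_⟩
          simp [PySem.Set.contains_eq_listContains, hns]
        exact absurd hmem0 (List.not_mem_nil)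
      · -- one text step
        set rem := m0 :: rest with hremdef
        rw [pvAltLoop, stepB]
        simp only [List.nil_append]
        set qt : String → Bool := fun m => PySem.Str.isIn m t with hqt
        have hnodup_rem : rem.Nodup := by
          rw [← hrem]; exact List.Nodup.filter _ (PySem.Set.nodup_ofList maps)
        have hrem_not_s : ∀ m ∈ rem, m ∉ s := by
          intro m hm
          rw [← hrem] at hm
          have h2 := (List.mem_filter.mp hm).2
          simp [PySem.Set.contains_eq_listContains] at h2
          exact h2
        -- the appended found list equals the A-side update of s
        have hS : s ++ rem.filter qt = PySem.Set.update s (maps.filter qt) := by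
          rw [PySem.Set.update_eq_append_filter, ofList_filter]
          congr 1
          rw [← hrem, List.filter_filter, List.filter_filter]
          apply List.filter_congr
          intro m _
          simp [Bool.and_comm]
        set s' := s ++ rem.filter qt with hs'
        have hnodup_s' : s'.Nodup := by
          rw [hs']
          refine List.Nodup.append hs (List.Nodup.filter _ hnodup_rem) ?_
          intro a ha hb
          exact hrem_not_s a (List.mem_of_mem_filter hb) ha
        -- the new worklist equals the invariant's filter at s'
        have hR : rem.filter (fun m => !qt m)
            = (PySem.Set.ofList maps).filter (fun m => !(PySem.Set.contains s' m)) := by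
          rw [← hrem, List.filter_filter]
          refine (List.filter_congr ?_).symm
          intro m hm
          by_cases hmem : m ∈ s
          · have h1 : m ∈ s' := by rw [hs']; exact List.mem_append_left _ hmem
            simp [PySem.Set.contains_eq_listContains, h1, hmem]
          · by_cases hq : qt m = true
            · have hmrem : m ∈ rem := by
                rw [← hrem]
                refine List.mem_filter.mpr ⟨hm, ?_⟩
                simp [PySem.Set.contains_eq_listContains, hmem]
              have h1 : m ∈ s' := by
                rw [hs']
                exact List.mem_append_right _ (List.mem_filter.mpr ⟨hmrem, hq⟩)
              simp [PySem.Set.contains_eq_listContains, h1, hmem, hq]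
            · have h1 : m ∉ s' := by
                rw [hs']
                intro hc
                rcases List.mem_append.mp hc with hc | hc
                · exact hmem hc
                · exact hq (List.mem_filter.mp hc).2
              simp [PySem.Set.contains_eq_listContains, h1, hmem, hq]
        rw [hR, ih _ hnodup_s']
        simp only [List.foldl_cons]
        have hstep : PySem.Set.update s (List.filter (fun m => PySem.Str.isIn m t) maps) = s' := by
          rw [hS]
        rw [hstep]

-- ===== VERDICT (by name: the statement is the Claim_ definition above) =====
theorem defineExictingMaps_spec : Claim_equal_defineExictingMaps := by
  intro list maps _
  unfold Spec_defineExictingMaps defineExictingMaps defineExictingMaps_alt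
  simp only
  rw [outerA_snd, ofList_foldl_append]
  rw [PySem.List.dedup_eq_ofList]
  have h0 : (PySem.Set.ofList maps).filter (fun m => !(PySem.Set.contains ([] : List String) m))
      = PySem.Set.ofList maps := by
    apply List.filter_eq_self.mpr
    intro m _
    simp [PySem.Set.contains_eq_listContains]
  rw [← h0, main_invariant maps list [] List.nodup_nil]
  rfl
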